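-- pv_equiv track=rewrite | github.com/Mitesh512/Data-Structure-and-algotirhms | array_sorting_binary_search_sliding_prefix_greedy/sliding_window.py | get_all_word_freq
-- ===== SOURCE A (Python) =====
-- def get_all_word_freq(s,words):
--     """
--     Problem: Given a list of words (all same length), and a string s,
--     count how many individual word matches appear in s.
--     """
--     n = len(s)
--     k = len(words[0])
--     if n < k:
--         return {}
--     words_freq = {word:0 for word in words}
--     for i in range(n-k+1):
--         curr_word = s[i:i+k]
--         if curr_word in words_freq:
--             words_freq[curr_word] += 1
--     return words_freq
-- ===== SOURCE B (Python) =====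
-- def get_all_word_freq(s, words):
--     """Rabin-Karp: rolling polynomial hash over each window; slice and verify only on a hash hit."""
--     k = len(words[0])
--     n = len(s)
--     if n < k:
--         return {}
--     B = 1000003
--     M = (1 << 61) - 1
--     pk = pow(B, k, M)
--     whashes = set()
--     for w in words:
--         hw = 0
--         for c in w:
--             hw = (hw * B + ord(c)) % M
--         whashes.add(hw)
--     cnt = {}
--     h = 0
--     for c in s[:k]:
--         h = (h * B + ord(c)) % M
--     if h in whashes:
--         win = s[0:k]
--         cnt[win] = cnt.get(win, 0) + 1
--     for i in range(1, n - k + 1):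
--         h = (h * B + ord(s[i + k - 1]) - ord(s[i - 1]) * pk) % M
--         if h in whashes:
--             win = s[i:i + k]
--             cnt[win] = cnt.get(win, 0) + 1
--     return {word: cnt.get(word, 0) for word in words}
-- ===== Notes on version B (the rewrite author's own statement) =====
-- stated objective: alternative
-- what changed: B replaces A's per-position dict-membership test on a fresh k-character slice with a Rabin-Karp rolling polynomial hash: one incremental hash update and one set lookup per position, slicing and verifying (by keying the counter on the slice) only on hash hits, then projecting the window counts onto words; it does fewer slices but pays Python-level modular arithmetic per character, so it is not measurably faster.
import Mathlib
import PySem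

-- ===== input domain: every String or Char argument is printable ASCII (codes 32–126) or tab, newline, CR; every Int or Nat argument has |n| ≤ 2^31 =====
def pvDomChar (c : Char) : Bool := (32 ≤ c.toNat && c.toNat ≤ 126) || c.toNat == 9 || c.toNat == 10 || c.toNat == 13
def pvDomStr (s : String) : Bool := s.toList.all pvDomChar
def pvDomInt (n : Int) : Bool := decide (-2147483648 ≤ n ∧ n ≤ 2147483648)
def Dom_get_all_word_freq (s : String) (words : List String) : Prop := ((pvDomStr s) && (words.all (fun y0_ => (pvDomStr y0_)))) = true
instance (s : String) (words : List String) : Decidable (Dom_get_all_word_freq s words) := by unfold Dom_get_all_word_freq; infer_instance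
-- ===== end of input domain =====

-- B re-implements A with a Rabin-Karp rolling hash (one incremental hash update and one set
-- lookup per position; slices only on hash hits, verified by keying the counter on the slice),
-- then projects the window counts onto `words`; objective: alternative algorithm, same result.

-- ===== PORT A =====
-- the body of A's window loop: slice the current window, count it if it is a tracked word
def pvAStep (s : String) (k : Int) (d : PySem.Dict String Int) (i : Int) : PySem.Dict String Int :=
  let curr := PySem.Str.slice s (some i) (some (i + k))
  if d.contains curr then d.modify curr 0 (· + 1) else d

def get_all_word_freq (s : String) (words : List String) : List (String × Int) :=
  let n : Int := PySem.Str.len s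
  match PySem.List.pyGet? words 0 with
  | none => []  -- words[0] raises IndexError: excluded by Pre_
  | some w0 =>
    let k : Int := PySem.Str.len w0
    if n < k then [] else
    let wf0 : PySem.Dict String Int := words.foldl (fun d w => d.insert w 0) PySem.Dict.empty
    let wf := (PySem.List.pyRange 0 (n - k + 1)).foldl (pvAStep s k) wf0
    wf.items

-- ===== PORT B =====
def pvB : Int := 1000003
def pvM : Int := 2305843009213693951   -- (1 << 61) - 1
-- one step of Source B's repeated statement `h = (h * B + ord(c)) % M`
def pvHashStep (h : Int) (c : Char) : Int := PySem.Int.mod (h * pvB + (c.toNat : Int)) pvM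
-- Source B's inner loop `hw = 0; for c in w: hw = (hw * B + ord(c)) % M`
def pvHash (cs : List Char) : Int := cs.foldl pvHashStep 0
-- ord(s[i]); the index is always in range where B uses it, so the none branch is unreachable
def pvOrdAt (s : String) (i : Int) : Int :=
  match PySem.Str.pyGet? s i with
  | some c => (c.toNat : Int)
  | none => 0

-- the body of B's rolling loop: update the hash, slice and count only on a hash hit
def pvBStep (s : String) (k pk : Int) (whashes : PySem.Set Int)
    (st : Int × PySem.Dict String Int) (i : Int) : Int × PySem.Dict String Int :=
  let h := PySem.Int.mod (st.1 * pvB + pvOrdAt s (i + k - 1) - pvOrdAt s (i - 1) * pk) pvM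
  let cnt := if h ∈ whashes then
      let win := PySem.Str.slice s (some i) (some (i + k))
      st.2.insert win (st.2.getD win 0 + 1)
    else st.2
  (h, cnt)

def get_all_word_freq_alt (s : String) (words : List String) : List (String × Int) :=
  match PySem.List.pyGet? words 0 with
  | none => []  -- words[0] raises IndexError: excluded by Pre_
  | some w0 =>
    let k : Int := PySem.Str.len w0
    let n : Int := PySem.Str.len s
    if n < k then [] else
    let pk : Int := PySem.Int.powMod pvB k.toNat pvM   -- pow(B, k, M); k = len(words[0]) ≥ 0
    let whashes : PySem.Set Int :=
      words.foldl (fun st w => st.add (pvHash w.toList)) PySem.Set.empty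
    let h0 : Int := (PySem.Str.slice s none (some k)).toList.foldl pvHashStep 0
    let cnt1 : PySem.Dict String Int :=
      if h0 ∈ whashes then
        let win := PySem.Str.slice s (some 0) (some k)
        (PySem.Dict.empty : PySem.Dict String Int).insert win
          ((PySem.Dict.empty : PySem.Dict String Int).getD win 0 + 1)
      else PySem.Dict.empty
    let res := (PySem.List.pyRange 1 (n - k + 1)).foldl (pvBStep s k pk whashes) (h0, cnt1)
    (words.foldl (fun d w => d.insert w (res.2.getD w 0)) PySem.Dict.empty).items

-- ===== PRECONDITION & SPEC =====
-- A indexes words[0], so it raises IndexError exactly when words is empty (B does the same).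
def Pre_get_all_word_freq (s : String) (words : List String) : Prop := words ≠ []
instance (s : String) (words : List String) : Decidable (Pre_get_all_word_freq s words) := by
  unfold Pre_get_all_word_freq; infer_instance
def pvWitness_get_all_word_freq : String × List String := ("abcab", ["ab", "ca"])

def Spec_get_all_word_freq (s : String) (words : List String) (out : List (String × Int)) : Prop := out = get_all_word_freq_alt s words
instance (s : String) (words : List String) (out : List (String × Int)) : Decidable (Spec_get_all_word_freq s words out) := by unfold Spec_get_all_word_freq; infer_instance

-- ===== CLAIM (what is proved, stated in full; the proofs are below) =====
def Claim_equal_get_all_word_freq : Prop := ∀ (s : String) (words : List String), Dom_get_all_word_freq s words → Pre_get_all_word_freq s words → Spec_get_all_word_freq s words (get_all_word_freq s words)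

-- ===== LEMMAS AND PROOFS =====

-- window j of length K, as both ports slice it
def winStr (s : String) (K : Nat) (j : Nat) : String :=
  PySem.Str.slice s (some (j : Int)) (some ((j : Int) + (K : Int)))

-- A's loop body at the string level
def fAd (d : PySem.Dict String Int) (c : String) : PySem.Dict String Int :=
  if d.contains c then d.modify c 0 (· + 1) else d

-- B's counting step at the string level
def cstep (hs : PySem.Set Int) (c : PySem.Dict String Int) (x : String) : PySem.Dict String Int :=
  if pvHash x.toList ∈ hs then c.insert x (c.getD x 0 + 1) else c

-- the un-reduced polynomial value of a char list
def pvP (cs : List Char) : Int := cs.foldl (fun a c => a * pvB + (c.toNat : Int)) 0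

theorem winStr_toList (s : String) (K j : Nat) :
    (winStr s K j).toList = (s.toList.drop j).take K := by
  simp [winStr, PySem.Str.toList_slice, PySem.Chars.slice_eq_listSlice,
    PySem.List.slice_natCast_add]

theorem pvM_pos : (0 : Int) < pvM := by norm_num [pvM]

theorem emod_jug (x c : Int) : ((x % pvM) * pvB + c) % pvM = (x * pvB + c) % pvM := by
  have hx : x % pvM ≡ x [ZMOD pvM] := Int.emod_emod_of_dvd x dvd_rfl
  exact (hx.mul_right pvB).add_right c

theorem emod_jug2 (x c d e : Int) :
    ((x % pvM) * pvB + c - d * (e % pvM)) % pvM = (x * pvB + c - d * e) % pvM := by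
  have hx : x % pvM ≡ x [ZMOD pvM] := Int.emod_emod_of_dvd x dvd_rfl
  have he : e % pvM ≡ e [ZMOD pvM] := Int.emod_emod_of_dvd e dvd_rfl
  exact ((hx.mul_right pvB).add_right c).sub ((Int.ModEq.refl d).mul he)

theorem pvHash_fold (cs : List Char) : ∀ x : Int,
    cs.foldl pvHashStep (x % pvM) = (cs.foldl (fun a c => a * pvB + (c.toNat : Int)) x) % pvM := by
  induction cs with
  | nil => intro x; simp
  | cons c cs ih =>
    intro x
    have h1 : pvHashStep (x % pvM) c = (x * pvB + (c.toNat : Int)) % pvM := by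
      rw [pvHashStep, PySem.Int.mod_eq_emod_of_pos pvM_pos, emod_jug]
    simp only [List.foldl_cons, h1, ih]

theorem pvHash_eq (cs : List Char) : pvHash cs = pvP cs % pvM := by
  have h := pvHash_fold cs 0
  simpa [pvHash, pvP] using h

theorem pvP_shift (u : List Char) : ∀ a : Int,
    u.foldl (fun a c => a * pvB + (c.toNat : Int)) a = a * pvB ^ u.length + pvP u := by
  induction u with
  | nil => intro a; simp [pvP]
  | cons c u ih =>
    intro a
    rw [List.foldl_cons, ih]
    conv_rhs => rw [pvP, List.foldl_cons, ih]
    simp only [List.length_cons]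
    ring

theorem pvP_cons (c : Char) (u : List Char) :
    pvP (c :: u) = (c.toNat : Int) * pvB ^ u.length + pvP u := by
  rw [pvP, List.foldl_cons, pvP_shift]
  rw [show (0 : Int) * pvB + (c.toNat : Int) = (c.toNat : Int) by ring]

theorem pvP_append_singleton (u : List Char) (c : Char) :
    pvP (u ++ [c]) = pvP u * pvB + (c.toNat : Int) := by
  rw [pvP, List.foldl_append]; rfl

theorem pvOrdAt_natCast {s : String} (j : Nat) (h : j < s.toList.length) :
    pvOrdAt s (j : Int) = ((s.toList[j]'h).toNat : Int) := by
  simp [pvOrdAt, List.getElem?_eq_getElem h]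

-- the rolling-hash update step lands on the hash of the next window
theorem roll (s : String) (K : Nat) (i : Nat) (hi : 1 ≤ i) (hik : i + K ≤ s.toList.length) :
    PySem.Int.mod (pvHash ((winStr s K (i - 1)).toList) * pvB
        + pvOrdAt s ((i : Int) + (K : Int) - 1) - pvOrdAt s ((i : Int) - 1)
          * PySem.Int.powMod pvB K pvM) pvM
      = pvHash ((winStr s K i).toList) := by
  have hM := pvM_pos
  have hidx1 : ((i : Int) + (K : Int) - 1) = ((i + K - 1 : Nat) : Int) := by omega
  have hidx2 : ((i : Int) - 1) = ((i - 1 : Nat) : Int) := by omega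
  have h1 : i + K - 1 < s.toList.length := by omega
  have h2 : i - 1 < s.toList.length := by omega
  rw [hidx1, hidx2, pvOrdAt_natCast _ h1, pvOrdAt_natCast _ h2,
    PySem.Int.powMod_eq_emod _ _ hM, PySem.Int.mod_eq_emod_of_pos hM,
    winStr_toList, winStr_toList, pvHash_eq, pvHash_eq, emod_jug2]
  congr 1
  -- pure polynomial identity on the two windows
  set cs := s.toList with hcs
  rcases Nat.eq_zero_or_pos K with hK | hK
  · subst hK
    simp only [List.take_zero, pvP, List.foldl_nil]
    simp only [show i + 0 - 1 = i - 1 from by omega]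
    ring
  · -- window i-1 = cs[i-1] :: mid, window i = mid ++ [cs[i+K-1]], mid = (cs.drop i).take (K-1)
    obtain ⟨K', rfl⟩ : ∃ K', K = K' + 1 := ⟨K - 1, by omega⟩
    have hdrop : cs.drop (i - 1) = cs[i - 1] :: cs.drop i := by
      rw [List.drop_eq_getElem_cons h2, show i - 1 + 1 = i from by omega]
    have hw1 : (cs.drop (i - 1)).take (K' + 1) = cs[i - 1] :: (cs.drop i).take K' := by
      rw [hdrop, List.take_succ_cons]
    have hmidlen : ((cs.drop i).take K').length = K' := by
      simp only [List.length_take, List.length_drop]; omega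
    have hlt : K' < (cs.drop i).length := by simp only [List.length_drop]; omega
    have hw2 : (cs.drop i).take (K' + 1)
        = (cs.drop i).take K' ++ [cs[i + K']'(by omega)] := by
      rw [List.take_add_one, List.getElem?_eq_getElem hlt]
      simp [List.getElem_drop]
    simp only [show i + (K' + 1) - 1 = i + K' from by omega]
    rw [hw1, hw2, pvP_cons, pvP_append_singleton, hmidlen, pow_succ]
    ring

-- A's window loop: keys never change
theorem A_fold_keys (L : List String) : ∀ d : PySem.Dict String Int,
    (L.foldl fAd d).keys = d.keys := by
  induction L with
  | nil => intro d; rfl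
  | cons c L ih =>
    intro d
    simp only [List.foldl_cons, fAd]
    by_cases hc : d.contains c
    · rw [ih, hc, if_pos rfl]
      rw [PySem.Dict.keys_modify, PySem.Dict.keys_insert_of_contains _ _ hc]
    · simp [hc, ih]

-- A's window loop adds, to each key already present, the number of windows equal to it
theorem A_fold_getD (L : List String) (w : String) : ∀ d : PySem.Dict String Int,
    d.contains w = true →
    (L.foldl fAd d).getD w 0 = d.getD w 0 + L.count w := by
  induction L with
  | nil => intro d _; simp
  | cons c L ih =>
    intro d hd
    simp only [List.foldl_cons, fAd]
    by_cases hc : c = w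
    · subst hc
      rw [if_pos hd]
      have hcont : (d.modify c 0 (· + 1)).contains c = true := by
        rw [PySem.Dict.contains_modify]; simp
      rw [ih _ hcont, PySem.Dict.getD_modify_self]
      simp [List.count_cons_self]; ring
    · have hcount : (c :: L).count w = L.count w := by
        rw [List.count_cons, beq_eq_false_iff_ne.mpr hc]; simp
      by_cases hdc : d.contains c
      · rw [if_pos hdc]
        have hcont : (d.modify c 0 (· + 1)).contains w = true := by
          rw [PySem.Dict.contains_modify, hd]; simp
        rw [ih _ hcont, PySem.Dict.getD_modify_of_ne _ _ _ (Ne.symm hc), hcount]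
      · rw [if_neg hdc, ih _ hd, hcount]

-- the all-zeros initial dict reads 0 at every key
theorem zeros_getD (L : List String) (w : String) : ∀ d : PySem.Dict String Int,
    d.getD w 0 = 0 → (L.foldl (fun d x => d.insert x 0) d).getD w 0 = 0 := by
  induction L with
  | nil => intro d h; exact h
  | cons x L ih =>
    intro d h
    simp only [List.foldl_cons]
    apply ih
    rw [PySem.Dict.getD_insert]
    split <;> simp [h]

-- B's verified counter: for a key whose hash is in the set, it counts all equal windows
theorem B_cnt_getD (hs : PySem.Set Int) (L : List String) (w : String)
    (hw : pvHash w.toList ∈ hs) : ∀ c : PySem.Dict String Int,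
    (L.foldl (cstep hs) c).getD w 0 = c.getD w 0 + L.count w := by
  induction L with
  | nil => intro c; simp
  | cons x L ih =>
    intro c
    simp only [List.foldl_cons, cstep]
    by_cases hx : pvHash x.toList ∈ hs
    · rw [if_pos hx, ih]
      rw [PySem.Dict.getD_insert]
      by_cases hxw : w = x
      · subst hxw; simp [List.count_cons_self]; ring
      · rw [if_neg hxw, List.count_cons,
          beq_eq_false_iff_ne.mpr (fun h => hxw h.symm)]
        simp
    · have hxw : w ≠ x := by
        intro h; subst h; exact hx hw
      rw [if_neg hx, ih, List.count_cons,
        beq_eq_false_iff_ne.mpr (fun h => hxw h.symm)]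
      simp

-- projection loop: inserting g x for each x of L reads back g w at any w ∈ L
theorem proj_getD_not_mem (L : List String) (g : String → Int) (w : String) (hw : w ∉ L) :
    ∀ d : PySem.Dict String Int,
    (L.foldl (fun d x => d.insert x (g x)) d).getD w 0 = d.getD w 0 := by
  induction L with
  | nil => intro d; rfl
  | cons x L ih =>
    intro d
    simp only [List.foldl_cons]
    rw [ih (by simp at hw; exact hw.2), PySem.Dict.getD_insert]
    have : w ≠ x := by simp at hw; exact hw.1
    simp [this]

theorem proj_getD (L : List String) (g : String → Int) (w : String) (hw : w ∈ L) :
    ∀ d : PySem.Dict String Int,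
    (L.foldl (fun d x => d.insert x (g x)) d).getD w 0 = g w := by
  induction L with
  | nil => cases hw
  | cons x L ih =>
    intro d
    simp only [List.foldl_cons]
    by_cases hmem : w ∈ L
    · exact ih hmem _
    · have hwx : w = x := by rcases List.mem_cons.mp hw with h | h; exact h; exact absurd h hmem
      subst hwx
      rw [proj_getD_not_mem L g w hmem, PySem.Dict.getD_insert]
      simp

-- B's rolling loop keeps the hash of the current window and counts windows 1..t
theorem B_loop (s : String) (K : Nat) (hs : PySem.Set Int) :
    ∀ t : Nat, t + K ≤ s.toList.length → ∀ c : PySem.Dict String Int,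
    (List.range t).foldl
        (fun st (j : Nat) => pvBStep s (K : Int) (PySem.Int.powMod pvB K pvM) hs st (1 + (j : Int)))
        (pvHash ((winStr s K 0).toList), c)
      = (pvHash ((winStr s K t).toList),
         ((List.range t).map (fun j => winStr s K (j + 1))).foldl (cstep hs) c) := by
  intro t
  induction t with
  | zero => intro _ c; simp
  | succ t ih =>
    intro ht c
    rw [List.range_succ, List.foldl_append, ih (by omega), List.map_append, List.foldl_append]
    simp only [List.foldl_cons, List.foldl_nil, List.map_cons, List.map_nil]
    have hcast : (1 : Int) + (t : Int) = ((t + 1 : Nat) : Int) := by push_cast; ring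
    have hroll := roll s K (t + 1) (by omega) (by omega)
    rw [show t + 1 - 1 = t from rfl] at hroll
    simp only [pvBStep, cstep, hcast, hroll]
    rfl

theorem ports_eq (s w0 : String) (ws : List String) :
    get_all_word_freq s (w0 :: ws) = get_all_word_freq_alt s (w0 :: ws) := by
  simp only [get_all_word_freq, get_all_word_freq_alt, PySem.List.pyGet?_zero_cons,
    PySem.Str.len_eq, Int.toNat_natCast]
  by_cases hnk : ((s.toList.length : Int) < (w0.toList.length : Int))
  · rw [if_pos hnk, if_pos hnk]
  · rw [if_neg hnk, if_neg hnk]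
    have hKN : w0.toList.length ≤ s.toList.length := by exact_mod_cast not_lt.mp hnk
    -- abbreviations (plain names, no `set`, to keep rewriting predictable)
    obtain ⟨N, hN⟩ : ∃ N, N = s.toList.length := ⟨_, rfl⟩
    obtain ⟨K, hK⟩ : ∃ K, K = w0.toList.length := ⟨_, rfl⟩
    rw [← hN, ← hK] at hKN ⊢
    obtain ⟨m, hm⟩ : ∃ m, m = N - K + 1 := ⟨_, rfl⟩
    have hmcast : ((N : Int) - (K : Int) + 1) = ((m : Nat) : Int) := by
      rw [hm]; push_cast; omega
    have hsv_def : ∃ hsv, hsv = List.foldl (fun st w => st.add (pvHash w.toList))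
        PySem.Set.empty (w0 :: ws) := ⟨_, rfl⟩
    obtain ⟨hsv, hhs⟩ := hsv_def
    rw [← hhs]
    have hmemhs : ∀ w ∈ (w0 :: ws), pvHash w.toList ∈ hsv := by
      intro w hw
      rw [hhs]
      exact (PySem.Set.mem_foldl_add (w0 :: ws) (fun w => pvHash w.toList)
        PySem.Set.empty _).mpr (Or.inr ⟨w, hw, rfl⟩)
    -- the initial hash is the hash of window 0, and the sliced window 0 is winStr 0
    have hwin0 : (winStr s K 0).toList = s.toList.take K := by
      rw [winStr_toList]; simp
    have hh0 : List.foldl pvHashStep 0 (PySem.Str.slice s none (some (K : Int))).toList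
        = pvHash ((winStr s K 0).toList) := by
      rw [pvHash, hwin0]
      congr 1
      simp [PySem.Str.toList_slice, PySem.Chars.slice_eq_listSlice, PySem.List.slice_to_natCast]
    have hwin0' : PySem.Str.slice s (some 0) (some (K : Int)) = winStr s K 0 := by
      apply String.toList_inj.mp
      rw [hwin0]
      simp [PySem.Str.toList_slice, PySem.Chars.slice_eq_listSlice, PySem.List.slice_to_natCast]
    rw [hh0, hwin0']
    -- pre-loop conditional insert is one cstep on window 0
    have hcnt1 : (if pvHash ((winStr s K 0).toList) ∈ hsv then
        PySem.Dict.empty.insert (winStr s K 0) (PySem.Dict.empty.getD (winStr s K 0) 0 + 1)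
        else (PySem.Dict.empty : PySem.Dict String Int))
        = cstep hsv PySem.Dict.empty (winStr s K 0) := rfl
    rw [hcnt1]
    -- B's main loop = cstep-fold over windows 1..m-1
    have hrange1 : PySem.List.pyRange 1 ((N : Int) - (K : Int) + 1)
        = (List.range (m - 1)).map (fun j : Nat => 1 + (j : Int)) := by
      rw [hmcast, PySem.List.pyRange_one,
        show (((m : Nat) : Int) - 1).toNat = m - 1 from by omega]
    rw [hrange1, List.foldl_map]
    rw [B_loop s K hsv (m - 1) (by omega) (cstep hsv PySem.Dict.empty (winStr s K 0))]
    dsimp only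
    have hCNT : ((List.range (m - 1)).map (fun j => winStr s K (j + 1))).foldl (cstep hsv)
          (cstep hsv PySem.Dict.empty (winStr s K 0))
        = ((List.range m).map (winStr s K)).foldl (cstep hsv) PySem.Dict.empty := by
      conv_rhs => rw [show m = (m - 1) + 1 from by omega, List.range_succ_eq_map,
        List.map_cons, List.foldl_cons, List.map_map]
      rfl
    rw [hCNT]
    -- A's loop = fAd-fold over all windows
    have hrange0 : PySem.List.pyRange 0 ((N : Int) - (K : Int) + 1)
        = (List.range m).map (fun j : Nat => (j : Int)) := by
      rw [hmcast, PySem.List.pyRange_zero_natCast]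
    rw [hrange0, List.foldl_map]
    have hfoldA : ∀ d : PySem.Dict String Int,
        (List.range m).foldl (fun d (j : Nat) => pvAStep s (K : Int) d (j : Int)) d
          = ((List.range m).map (winStr s K)).foldl fAd d := by
      intro d; rw [List.foldl_map]; rfl
    rw [hfoldA]
    -- compare the two result dicts item by item
    have hd0keys : (List.foldl (fun d w => d.insert w (0 : Int)) PySem.Dict.empty (w0 :: ws)).keys
        = PySem.Set.ofList (w0 :: ws) := by
      rw [PySem.Dict.keys_foldl_insert]
      rfl
    have hd0nodup : (List.foldl (fun d w => d.insert w (0 : Int)) PySem.Dict.empty (w0 :: ws)).keys.Nodup := by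
      exact PySem.Dict.nodup_keys_foldl_insert _ _ _ (by simp)
    have hkeysA : (((List.range m).map (winStr s K)).foldl fAd
        (List.foldl (fun d w => d.insert w (0 : Int)) PySem.Dict.empty (w0 :: ws))).keys
        = PySem.Set.ofList (w0 :: ws) := by
      rw [A_fold_keys, hd0keys]
    have hkeysB : (List.foldl (fun d w => d.insert w
          ((((List.range m).map (winStr s K)).foldl (cstep hsv) PySem.Dict.empty).getD w 0))
          PySem.Dict.empty (w0 :: ws)).keys
        = PySem.Set.ofList (w0 :: ws) := by
      rw [PySem.Dict.keys_foldl_insert]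
      rfl
    rw [PySem.Dict.items_eq_map_keys _ (by rw [A_fold_keys]; exact hd0nodup) 0,
      PySem.Dict.items_eq_map_keys _ (by rw [hkeysB]; exact PySem.Set.nodup_ofList _) 0,
      hkeysA, hkeysB]
    apply List.map_congr_left
    intro w hw
    have hww : w ∈ (w0 :: ws) := (PySem.Set.mem_ofList _ _).mp hw
    have hcont : (List.foldl (fun d w => d.insert w (0 : Int)) PySem.Dict.empty (w0 :: ws)).contains w = true := by
      rw [PySem.Dict.contains_iff_mem_keys, hd0keys]
      exact hw
    rw [A_fold_getD _ _ _ hcont, zeros_getD (w0 :: ws) w PySem.Dict.empty (by simp),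
      proj_getD (w0 :: ws) _ w hww, B_cnt_getD hsv _ w (hmemhs w hww)]
    simp

-- ===== VERDICT (by name: the statement is the Claim_ definition above) =====
theorem get_all_word_freq_spec : Claim_equal_get_all_word_freq := by
  intro s words _ hpre
  unfold Spec_get_all_word_freq
  obtain ⟨w0, ws, rfl⟩ := List.exists_cons_of_ne_nil hpre
  exact ports_eq s w0 ws
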